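-- pv_equiv track=rewrite | github.com/devYuMinKim/Coding_Test_with_JavaScript | 20220817/모범답안/20220817_09.js/DefenseCastle.py | solution
-- ===== SOURCE A (Python) =====
-- import math
--
-- def solution(distance, time):
--     """
--     :param distance: int[]
--     :param time: int[]
--     :return: int
--     """
--
--     enemy = []
--
--     for i in range(len(distance)):
--         enemy.append(math.floor(distance[i] / time[i]))
--
--     enemy.sort()
--
--     curTime = 0
--     shield = 0
--     for enemyArrivalTime in enemy:
--         # 현재까지 아군 생성
--         if curTime < enemyArrivalTime:
--             shield += enemyArrivalTime - curTime
--
--         # 현재 적이 공격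
--         shield -= 1
--
--         # 적군보다 아군이 적을 경우 -1 반환
--         if shield < 0:
--             return -1
--
--         # 현재 시간 설정
--         curTime = enemyArrivalTime
--
--     return shield
-- ===== SOURCE B (Python) =====
-- def solution(distance, time):
--     # Sort-free reformulation: the defense fails iff some arrival time e has more
--     # than e enemies arriving no later than e (Hall-style counting condition);
--     # otherwise the surviving shield count is max(arrival) - number of enemies.
--     enemy = [d // t for d, t in zip(distance, time)]
--     if not enemy:
--         return 0
--     if any(sum(1 for x in enemy if x <= e) > e for e in enemy):
--         return -1
--     return max(enemy) - len(enemy)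
-- ===== Notes on version B (the rewrite author's own statement) =====
-- stated objective: alternative
-- what changed: B eliminates the sort and the curTime/shield simulation entirely: it decides failure by a Hall-style counting condition (some arrival e is reached by more than e enemies arriving at or before e) and otherwise returns max(arrival) - n in closed form; it trades A's O(n log n) sort-and-simulate for an O(n^2) quantifier over counts.
import Mathlib
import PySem

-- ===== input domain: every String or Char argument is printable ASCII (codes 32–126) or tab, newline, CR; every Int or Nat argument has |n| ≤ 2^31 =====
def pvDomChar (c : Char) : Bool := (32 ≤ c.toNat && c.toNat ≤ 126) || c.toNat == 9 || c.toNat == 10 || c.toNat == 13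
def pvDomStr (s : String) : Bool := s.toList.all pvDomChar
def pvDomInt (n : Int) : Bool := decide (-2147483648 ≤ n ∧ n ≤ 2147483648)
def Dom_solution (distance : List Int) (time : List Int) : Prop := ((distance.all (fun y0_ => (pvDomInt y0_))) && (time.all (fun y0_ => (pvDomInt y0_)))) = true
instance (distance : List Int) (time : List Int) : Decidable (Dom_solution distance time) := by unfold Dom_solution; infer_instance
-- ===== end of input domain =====

-- B replaces A's sort-and-simulate (curTime/shield accumulator over the sorted arrivals) by a
-- sort-free Hall-style counting test plus the closed form max - n (objective: alternative);
-- proved equal on Pre_ (A's non-raising inputs).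

-- ===== PORT A =====
-- A's second loop: for enemyArrivalTime in enemy: … with early 'return -1'.
def solutionLoopA : List Int → Int → Int → Int
  | [], _, shield => shield
  | e :: rest, curTime, shield =>
    let shield1 := if curTime < e then shield + (e - curTime) else shield
    let shield2 := shield1 - 1
    if shield2 < 0 then -1 else solutionLoopA rest e shield2

def solution (distance : List Int) (time : List Int) : Int :=
  -- enemy built by appending math.floor(distance[i] / time[i]) over range(len(distance));
  -- math.floor(d / t) = d // t exactly on the |n| ≤ 2^31 domain; pyGetD's default is never
  -- read under Pre_ (in range), and t = 0 (ZeroDivisionError) is excluded by Pre_.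
  let enemy := (PySem.List.pyRange 0 (distance.length : Int) 1).foldl
    (fun acc i => acc ++ [PySem.Int.floordiv (PySem.List.pyGetD distance i 0) (PySem.List.pyGetD time i 0)]) []
  let enemy := PySem.List.sorted enemy id
  solutionLoopA enemy 0 0

-- ===== PORT B =====
def solution_alt (distance : List Int) (time : List Int) : Int :=
  -- [d // t for d, t in zip(distance, time)]
  let enemy := (distance.zip time).map (fun p => PySem.Int.floordiv p.1 p.2)
  if enemy = [] then 0
  -- sum(1 for x in enemy if x <= e) is List.countP (a 0/1 generator sum counts the hits)
  else if enemy.any (fun e => decide ((enemy.countP (fun x => decide (x ≤ e)) : Int) > e)) then -1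
  else (PySem.List.max? enemy (fun x => x)).getD 0 - enemy.length

-- ===== PRECONDITION & SPEC =====
-- Pre_ excludes exactly A's exceptions: time shorter than distance (IndexError at i = len(time))
-- and a zero among the used time entries (ZeroDivisionError).
def Pre_solution (distance : List Int) (time : List Int) : Prop :=
  distance.length ≤ time.length ∧ ∀ t ∈ time.take distance.length, t ≠ 0
instance (distance : List Int) (time : List Int) : Decidable (Pre_solution distance time) := by
  unfold Pre_solution; infer_instance

def pvWitness_solution : List Int × List Int := ([5, 3, 14], [1, 2, 3])

def Spec_solution (distance : List Int) (time : List Int) (out : Int) : Prop := out = solution_alt distance time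
instance (distance : List Int) (time : List Int) (out : Int) : Decidable (Spec_solution distance time out) := by unfold Spec_solution; infer_instance

-- ===== CLAIM (what is proved, stated in full; the proofs are below) =====
def Claim_equal_solution : Prop := ∀ (distance : List Int) (time : List Int), Dom_solution distance time → Pre_solution distance time → Spec_solution distance time (solution distance time)

-- ===== LEMMAS AND PROOFS =====

-- Proof-side helper: 'the i-th element of the sorted list (counting from m) is ≤ its index'.
def badFrom : List Int → Int → Bool
  | [], _ => false
  | e :: rest, i => if e ≤ i then true else badFrom rest (i + 1)

lemma loopA_cons (e c s : Int) (rest : List Int) :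
    solutionLoopA (e :: rest) c s =
      if (if c < e then s + (e - c) else s) - 1 < 0 then -1
      else solutionLoopA rest e ((if c < e then s + (e - c) else s) - 1) := rfl

lemma badFrom_cons (e i : Int) (rest : List Int) :
    badFrom (e :: rest) i = if e ≤ i then true else badFrom rest (i + 1) := rfl

-- Under Pre_, A's index-building loop produces exactly B's zip-map list.
lemma build_eq (distance time : List Int) (h : distance.length ≤ time.length) :
    (PySem.List.pyRange 0 (distance.length : Int) 1).foldl
      (fun acc i => acc ++ [PySem.Int.floordiv (PySem.List.pyGetD distance i 0) (PySem.List.pyGetD time i 0)]) []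
    = (distance.zip time).map (fun p => PySem.Int.floordiv p.1 p.2) := by
  rw [PySem.List.pyRange_zero_natCast,
    PySem.List.foldl_append_singleton_eq_map
      (fun i => PySem.Int.floordiv (PySem.List.pyGetD distance i 0) (PySem.List.pyGetD time i 0))]
  rw [List.nil_append, List.map_map]
  apply List.ext_getElem
  · simp [Nat.min_eq_left h]
  · intro i h1 h2
    simp only [List.getElem_map, List.getElem_range, Function.comp,
      PySem.List.pyGetD_natCast, List.getElem_zip]
    have hi : i < distance.length := by simpa using h1
    rw [List.getD_eq_getElem _ _ hi, List.getD_eq_getElem _ _ (lt_of_lt_of_le hi h)]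

-- The accumulator invariant: entering A's loop with curTime c, shield c - m, on a sorted
-- remainder all ≥ c, equals the index test starting at counter m plus the closed form.
lemma loopA_char (l : List Int) : ∀ c m : Int, l.Pairwise (· ≤ ·) → (∀ e ∈ l, c ≤ e) → m ≤ c →
    solutionLoopA l c (c - m)
    = (if badFrom l m then -1
       else match l.getLast? with | none => c - m | some e => e - m - l.length) := by
  induction l with
  | nil => intro c m _ _ _; simp [solutionLoopA, badFrom]
  | cons e rest ih =>
    intro c m hs hge hm
    have hce : c ≤ e := hge e (List.mem_cons_self)
    have hrest : ∀ x ∈ rest, e ≤ x := (List.pairwise_cons.mp hs).1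
    have htail := (List.pairwise_cons.mp hs).2
    have hin : (if c < e then (c - m) + (e - c) else (c - m)) = e - m := by
      split_ifs <;> omega
    rw [loopA_cons, hin, badFrom_cons]
    by_cases hem : e ≤ m
    · rw [if_pos (by omega), if_pos hem]; simp
    · rw [if_neg (by omega), if_neg hem]
      rw [show e - m - 1 = e - (m + 1) by ring]
      rw [ih e (m + 1) htail hrest (by omega)]
      cases rest with
      | nil => simp [badFrom]; omega
      | cons x xs =>
        rw [List.getLast?_cons_cons]
        by_cases hb : badFrom (x :: xs) (m + 1)
        · simp [hb]
        · obtain ⟨y, hy⟩ : ∃ y, (x :: xs).getLast? = some y :=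
            ⟨(x :: xs).getLast (by simp), List.getLast?_eq_some_getLast (by simp)⟩
          simp only [hb, Bool.false_eq_true, if_false, hy, List.length_cons]
          push_cast; ring

-- A's whole loop from (0, 0) on a sorted list, via the index test.
lemma loop_eq (l : List Int) (hs : l.Pairwise (· ≤ ·)) :
    solutionLoopA l 0 0
    = (if badFrom l 0 then -1
       else match l.getLast? with | none => 0 | some e => e - l.length) := by
  cases l with
  | nil => simp [solutionLoopA, badFrom]
  | cons e rest =>
    have hrest : ∀ x ∈ rest, e ≤ x := (List.pairwise_cons.mp hs).1
    have htail := (List.pairwise_cons.mp hs).2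
    rw [loopA_cons, badFrom_cons]
    by_cases he : e ≤ 0
    · rw [if_pos (by split_ifs <;> omega), if_pos he]; simp
    · have hin : (if (0 : Int) < e then (0 : Int) + (e - 0) else 0) - 1 = e - 1 := by
        split_ifs <;> omega
      rw [hin, if_neg (by omega), if_neg he]
      rw [loopA_char rest e 1 htail hrest (by omega)]
      rw [show (0 : Int) + 1 = 1 by ring]
      cases rest with
      | nil => simp [badFrom]
      | cons x xs =>
        rw [List.getLast?_cons_cons]
        by_cases hb : badFrom (x :: xs) 1
        · simp [hb]
        · obtain ⟨y, hy⟩ : ∃ y, (x :: xs).getLast? = some y :=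
            ⟨(x :: xs).getLast (by simp), List.getLast?_eq_some_getLast (by simp)⟩
          simp only [hb, Bool.false_eq_true, if_false, hy, List.length_cons]
          push_cast; ring

-- badFrom as an existential over indices.
lemma badFrom_iff (l : List Int) : ∀ m : Int,
    badFrom l m = true ↔ ∃ i : Nat, ∃ h : i < l.length, l[i] ≤ m + i := by
  induction l with
  | nil => intro m; simp [badFrom]
  | cons e rest ih =>
    intro m
    rw [badFrom_cons]
    constructor
    · intro h
      split_ifs at h with he
      · exact ⟨0, by simp, by simpa using he⟩
      · obtain ⟨i, hi, hle⟩ := (ih (m + 1)).mp h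
        refine ⟨i + 1, by simpa using hi, ?_⟩
        simp only [List.getElem_cons_succ]
        push_cast
        omega
    · rintro ⟨i, hi, hle⟩
      split_ifs with he
      · rfl
      · cases i with
        | zero => simp at hle; omega
        | succ j =>
          apply (ih (m + 1)).mpr
          refine ⟨j, by simpa using hi, ?_⟩
          simp only [List.getElem_cons_succ] at hle
          push_cast at hle ⊢
          omega

-- On a sorted list, the index test is the Hall counting condition.
lemma bad_iff_hall (l : List Int) (hs : l.Pairwise (· ≤ ·)) :
    badFrom l 0 = true ↔ ∃ e ∈ l, ((l.countP (fun x => decide (x ≤ e)) : Int) > e) := by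
  have hpg := List.pairwise_iff_getElem.mp hs
  rw [badFrom_iff]
  constructor
  · rintro ⟨i, hi, hle⟩
    refine ⟨l[i], List.getElem_mem hi, ?_⟩
    have hcnt : i + 1 ≤ l.countP (fun x => decide (x ≤ l[i])) := by
      have htake : (l.take (i + 1)).countP (fun x => decide (x ≤ l[i])) = i + 1 := by
        have hall : ∀ x ∈ l.take (i + 1), (fun x => decide (x ≤ l[i])) x = true := by
          intro x hx
          obtain ⟨j, hj, hxj⟩ := List.mem_iff_getElem.mp hx
          have hj' : j < i + 1 := lt_of_lt_of_le hj (by simp)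
          have hjl : j < l.length := by
            have := hj; rw [List.length_take] at this; omega
          rw [List.getElem_take] at hxj
          subst hxj
          simp only [decide_eq_true_eq]
          rcases Nat.lt_or_ge j i with h | h
          · exact hpg j i hjl hi h
          · have : j = i := by omega
            subst this; exact le_refl _
        have := List.countP_eq_length.mpr hall
        rw [this, List.length_take]
        omega
      calc i + 1 = (l.take (i + 1)).countP (fun x => decide (x ≤ l[i])) := htake.symm
        _ ≤ l.countP (fun x => decide (x ≤ l[i])) :=
            (List.take_sublist _ _).countP_le
    have : ((i : Int)) < ((l.countP (fun x => decide (x ≤ l[i])) : Nat) : Int) := by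
      exact_mod_cast Nat.lt_of_lt_of_le (Nat.lt_succ_self i) hcnt
    omega
  · rintro ⟨e, he, hgt⟩
    set k := l.countP (fun x => decide (x ≤ e)) with hk
    have hk1 : 1 ≤ k := List.countP_pos_iff.mpr ⟨e, he, by simp⟩
    have hklen : k ≤ l.length := List.countP_le_length
    have hik : k - 1 < l.length := by omega
    have hle : l[k - 1] ≤ e := by
      by_contra hcon
      rw [not_le] at hcon
      have hdrop : (l.drop (k - 1)).countP (fun x => decide (x ≤ e)) = 0 := by
        rw [List.countP_eq_zero]
        intro x hx
        obtain ⟨j, hj, hxj⟩ := List.mem_iff_getElem.mp hx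
        rw [List.getElem_drop] at hxj
        subst hxj
        simp only [decide_eq_true_eq, not_le]
        rcases Nat.eq_zero_or_pos j with h0 | h0
        · subst h0; simpa using hcon
        · have hjl : k - 1 + j < l.length := by
            have := hj; rw [List.length_drop] at this; omega
          exact lt_of_lt_of_le hcon (hpg (k - 1) (k - 1 + j) hik hjl (by omega))
      have hsum : l.countP (fun x => decide (x ≤ e))
          = (l.take (k - 1)).countP (fun x => decide (x ≤ e))
            + (l.drop (k - 1)).countP (fun x => decide (x ≤ e)) := by
        conv_lhs => rw [← List.take_append_drop (k - 1) l]
        rw [List.countP_append]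
      have htk := List.countP_le_length (p := fun x => decide (x ≤ e)) (l := l.take (k - 1))
      rw [List.length_take] at htk
      rw [← hk, hdrop] at hsum
      omega
    refine ⟨k - 1, hik, ?_⟩
    have : (e : Int) ≤ ((k - 1 : Nat) : Int) := by
      push_cast [hk1]; omega
    calc l[k - 1] ≤ e := hle
      _ ≤ 0 + ((k - 1 : Nat) : Int) := by omega
  
-- On a sorted nonempty list, the last element is the (unique) maximum value.
lemma getLast_eq_max (l E : List Int) (hp : l.Perm E) (hs : l.Pairwise (· ≤ ·)) (hne : E ≠ []) :
    l.getLast? = PySem.List.max? E (fun x => x) := by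
  have hl : l ≠ [] := by
    intro h; subst h; exact hne (List.Perm.nil_eq hp).symm
  obtain ⟨m, hm⟩ : ∃ m, PySem.List.max? E (fun x => x) = some m := by
    cases hmx : PySem.List.max? E (fun x => x) with
    | none => exact absurd ((PySem.List.max?_eq_none_iff E (fun x => x)).mp hmx) hne
    | some m => exact ⟨m, rfl⟩
  have hlast_mem : l.getLast hl ∈ l := List.getLast_mem hl
  have hmax_all : ∀ x ∈ l, x ≤ l.getLast hl := by
    intro x hx
    obtain ⟨j, hj, hxj⟩ := List.mem_iff_getElem.mp hx
    subst hxj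
    rw [List.getLast_eq_getElem]
    rcases Nat.lt_or_ge j (l.length - 1) with h | h
    · exact List.pairwise_iff_getElem.mp hs j (l.length - 1) hj (by omega) h
    · have : j = l.length - 1 := by omega
      subst this; exact le_refl _
  have hmem : m ∈ l := hp.mem_iff.mpr (PySem.List.max?_mem hm)
  have h1 : m ≤ l.getLast hl := hmax_all m hmem
  have h2 : l.getLast hl ≤ m := PySem.List.max?_isMax hm _ (hp.mem_iff.mp hlast_mem)
  rw [hm, List.getLast?_eq_some_getLast hl]
  exact congrArg some (le_antisymm h2 h1)

-- ===== VERDICT (by name: the statement is the Claim_ definition above) =====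
theorem solution_spec : Claim_equal_solution := by
  intro distance time _ hpre
  unfold Spec_solution solution solution_alt
  rw [build_eq distance time hpre.1]
  set E := (distance.zip time).map (fun p => PySem.Int.floordiv p.1 p.2) with hE
  set L := PySem.List.sorted E id with hL
  have hperm : L.Perm E := PySem.List.sorted_perm E id false
  have hs : L.Pairwise (· ≤ ·) := PySem.List.sorted_pairwise E id
  rw [loop_eq L hs]
  by_cases hEe : E = []
  · have : L = [] := List.Perm.eq_nil (hEe ▸ hperm)
    rw [this, if_pos hEe]
    simp [badFrom]
  · rw [if_neg hEe]
    have hany : (E.any (fun e => decide ((E.countP (fun x => decide (x ≤ e)) : Int) > e))) = badFrom L 0 := by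
      apply Bool.eq_iff_iff.mpr
      rw [List.any_eq_true, bad_iff_hall L hs]
      constructor
      · rintro ⟨e, heE, hp⟩
        exact ⟨e, hperm.mem_iff.mpr heE,
          by rw [hperm.countP_eq]; exact decide_eq_true_eq.mp hp⟩
      · rintro ⟨e, heL, hgt⟩
        exact ⟨e, hperm.mem_iff.mp heL,
          decide_eq_true_eq.mpr (by rwa [hperm.countP_eq] at hgt)⟩
    rw [hany]
    by_cases hb : badFrom L 0
    · rw [if_pos hb, if_pos hb]
    · rw [if_neg hb, if_neg hb]
      have hLne : L ≠ [] := by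
        intro h
        exact hEe (List.Perm.nil_eq (h ▸ hperm)).symm
      rw [← getLast_eq_max L E hperm hs hEe, List.getLast?_eq_some_getLast hLne]
      simp only [Option.getD_some]
      rw [hperm.length_eq]
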